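-- pv_equiv track=rewrite | github.com/ksk-S/self-model-numerics | fig_ca_wd.py | cl_reachable
-- ===== SOURCE A (Python) =====
-- N = 5            # world cells
--
-- N_AGENT = 4      # 2-bit memory: 4 agent states
--
-- W0 = 4           # initial world state: (0,0,1,0,0). Rule 0 dies in 1 step
--
-- def apply_rule(R, l, c, r):
--     """Wolfram rule R applied to neighborhood (l, c, r) in {0,1}^3."""
--     return (R >> (4 * l + 2 * c + r)) & 1
--
-- def step_world(R, w, A):
--     """w is integer encoding of (cell_0, ..., cell_{N-1}). Cell 0 <- A.
--     Other cells follow rule R cyclically (using the OLD cell-0 as their neighbour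
--     so the agent-override and rule update happen in lock-step)."""
--     bits = [(w >> i) & 1 for i in range(N)]
--     new = [0] * N
--     new[0] = A
--     for i in range(1, N):
--         l = bits[(i - 1) % N]
--         c = bits[i]
--         r = bits[(i + 1) % N]
--         new[i] = apply_rule(R, l, c, r)
--     return sum(b << i for i, b in enumerate(new))
--
-- def get_obs(w):
--     """Y_t = cell at position N-1 (the cell on the cyclic-ring opposite to agent)."""
--     return (w >> (N - 1)) & 1
--
-- def get_action(m, y):
--     """A_t = (m >> y) & 1 -- output the y-th bit of M_t.
--     With Y=0: outputs bit 0; with Y=1: outputs bit 1.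
--     All four memory states have distinct (A | Y=0, A | Y=1) pairs:
--       m=0 -> (0, 0), m=1 -> (1, 0), m=2 -> (0, 1), m=3 -> (1, 1).
--     So |epsilon^bare_self| = 4."""
--     return (m >> y) & 1
--
-- def step_agent(m, y, a):
--     """M_{t+1} = M_t XOR A_t -- toggle bit 0 of M by the agent's own action.
--     The update kernel g(M, Y, A) = M XOR A genuinely depends on A (Theorem E
--     enactivity: A = 0 leaves M, A = 1 toggles bit 0). Bit 1 of M is never
--     toggled, so a CL coupling whose Y stream never forces bit 1 to be read
--     fuses m=0 with m=2 and m=1 with m=3."""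
--     return m ^ a
--
-- def cl_reachable(R, w_0=W0):
--     """Forward BFS over (m, w) joint states under deterministic CL, starting
--     from (m, w_0) for each m. Returns the reachable set (= R(S, T) at this w_0)."""
--     visited = set()
--     frontier = {(m, w_0) for m in range(N_AGENT)}
--     while frontier:
--         nxt = set()
--         for (m, w) in frontier:
--             if (m, w) in visited:
--                 continue
--             visited.add((m, w))
--             y = get_obs(w)
--             a = get_action(m, y)
--             w2 = step_world(R, w, a)
--             m2 = step_agent(m, y, a)
--             if (m2, w2) not in visited:
--                 nxt.add((m2, w2))
--         frontier = nxt
--     return visited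
-- ===== SOURCE B (Python) =====
-- N = 5
-- N_AGENT = 4
-- W0 = 4
--
-- def apply_rule(R, l, c, r):
--     return (R >> (4 * l + 2 * c + r)) & 1
--
-- def step_world(R, w, A):
--     bits = [(w >> i) & 1 for i in range(N)]
--     new = [0] * N
--     new[0] = A
--     for i in range(1, N):
--         l = bits[(i - 1) % N]
--         c = bits[i]
--         r = bits[(i + 1) % N]
--         new[i] = apply_rule(R, l, c, r)
--     return sum(b << i for i, b in enumerate(new))
--
-- def get_obs(w):
--     return (w >> (N - 1)) & 1
--
-- def get_action(m, y):
--     return (m >> y) & 1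
--
-- def step_state(R, m, w):
--     """The unique successor of joint state (m, w) under the deterministic coupling."""
--     y = get_obs(w)
--     a = get_action(m, y)
--     return (m ^ a, step_world(R, w, a))
--
-- def cl_reachable(R, w_0=W0):
--     """Each joint state has exactly one successor, so the reachable set is the
--     union of the N_AGENT deterministic trajectories, advanced in lockstep: keep
--     a fixed vector of one cursor per start, mark unseen cursor states, and stop
--     as soon as a whole round marks nothing new (then nothing new can ever come)."""
--     visited = set()
--     heads = [(m, w_0) for m in range(N_AGENT)]
--     while True:
--         new = False
--         for s in heads:
--             if s not in visited:
--                 visited.add(s)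
--                 new = True
--         if not new:
--             return visited
--         heads = [step_state(R, m, w) for (m, w) in heads]
-- ===== Notes on version B (the rewrite author's own statement) =====
-- stated objective: alternative
-- what changed: Replaces the frontier/next-frontier set BFS by lockstep following of the four deterministic trajectories: a fixed vector of one cursor per start state is advanced by the unique successor map each round, unseen cursor states are added to the shared visited set, and the loop stops when a whole round adds nothing new (determinism guarantees saturation then).
import Mathlib
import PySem

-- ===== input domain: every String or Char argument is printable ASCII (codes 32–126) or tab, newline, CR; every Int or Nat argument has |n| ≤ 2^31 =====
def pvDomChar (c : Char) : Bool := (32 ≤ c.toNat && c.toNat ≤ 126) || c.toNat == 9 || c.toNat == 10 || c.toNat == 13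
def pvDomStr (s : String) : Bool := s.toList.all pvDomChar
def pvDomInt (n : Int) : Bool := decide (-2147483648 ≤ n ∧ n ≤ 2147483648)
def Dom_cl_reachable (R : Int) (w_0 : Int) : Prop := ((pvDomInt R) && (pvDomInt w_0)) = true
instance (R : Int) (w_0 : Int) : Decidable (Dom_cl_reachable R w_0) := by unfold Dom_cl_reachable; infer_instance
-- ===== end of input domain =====

-- B replaces the frontier/next-frontier BFS by lockstep advance of the four deterministic
-- per-start trajectories with a shared visited set (objective: alternative, same cost).

-- ===== PORT A =====
-- shared module helpers (used by both Pythons)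
def apply_rule (R l c r : Int) : Int := PySem.Int.band (R >>> (4 * l + 2 * c + r).toNat) 1
-- shift amount 4*l+2*c+r is nonnegative here (l,c,r are bits), so .toNat is exact

def step_world (R w A : Int) : Int :=
  let bits : List Int := (PySem.List.pyRange 0 5 1).map (fun i => PySem.Int.band (w >>> i.toNat) 1)
  -- indices below are in range [0,5), so pyGetD is exact list indexing
  let nw : List Int := [A] ++ (PySem.List.pyRange 1 5 1).map (fun i =>
    apply_rule R (PySem.List.pyGetD bits (PySem.Int.mod (i - 1) 5) 0)
                 (PySem.List.pyGetD bits i 0)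
                 (PySem.List.pyGetD bits (PySem.Int.mod (i + 1) 5) 0))
  (PySem.List.enumerate nw 0).foldl (fun acc p => acc + (p.2 <<< p.1.toNat)) 0

def get_obs (w : Int) : Int := PySem.Int.band (w >>> 4) 1

def get_action (m y : Int) : Int := PySem.Int.band (m >>> y.toNat) 1
-- y is a bit (0 or 1) wherever get_action is called, so .toNat is exact

-- A's inner `for (m, w) in frontier` loop, carrying (visited, nxt)
def pvLevelA (R : Int) : List (Int × Int) → PySem.Set (Int × Int) → PySem.Set (Int × Int) →
    PySem.Set (Int × Int) × PySem.Set (Int × Int)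
  | [], vis, nx => (vis, nx)
  | s :: F, vis, nx =>
    if s ∈ vis then pvLevelA R F vis nx
    else
      let vis' := PySem.Set.add vis s
      let y := get_obs s.2
      let a := get_action s.1 y
      let w2 := step_world R s.2 a
      let m2 := PySem.Int.bxor s.1 a
      if (m2, w2) ∈ vis' then pvLevelA R F vis' nx
      else pvLevelA R F vis' (PySem.Set.add nx (m2, w2))

-- A's `while frontier:` loop (fuel-guarded for totality; 1000 rounds are never
-- reached: visited can hold at most 132 states and grows every productive round)
def pvLoopA (R : Int) : Nat → PySem.Set (Int × Int) → PySem.Set (Int × Int) → PySem.Set (Int × Int)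
  | 0, vis, _ => vis
  | f + 1, vis, frontier =>
    if frontier.isEmpty then vis
    else
      let p := pvLevelA R frontier vis PySem.Set.empty
      pvLoopA R f p.1 p.2

def cl_reachable (R : Int) (w_0 : Int) : List (Int × Int) :=
  pvLoopA R 1000 PySem.Set.empty
    (PySem.Set.ofList ((PySem.List.pyRange 0 4 1).map (fun m => (m, w_0))))

-- ===== PORT B =====
def step_state (R m w : Int) : Int × Int :=
  let y := get_obs w
  let a := get_action m y
  (PySem.Int.bxor m a, step_world R w a)

-- B's marking pass over the cursor vector, carrying (visited, new)
def pvEmitB : List (Int × Int) → PySem.Set (Int × Int) → Bool →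
    PySem.Set (Int × Int) × Bool
  | [], vis, nw => (vis, nw)
  | s :: H, vis, nw =>
    if s ∈ vis then pvEmitB H vis nw
    else pvEmitB H (PySem.Set.add vis s) true

-- B's `while True:` loop (same fuel guard as A's loop; never reached)
def pvLoopB (R : Int) : Nat → PySem.Set (Int × Int) → List (Int × Int) → PySem.Set (Int × Int)
  | 0, vis, _ => vis
  | f + 1, vis, heads =>
    let p := pvEmitB heads vis false
    if p.2 = false then p.1
    else pvLoopB R f p.1 (heads.map (fun s => step_state R s.1 s.2))

def cl_reachable_alt (R : Int) (w_0 : Int) : List (Int × Int) :=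
  pvLoopB R 1000 PySem.Set.empty ((PySem.List.pyRange 0 4 1).map (fun m => (m, w_0)))

-- ===== PRECONDITION & SPEC =====
def Spec_cl_reachable (R : Int) (w_0 : Int) (out : List (Int × Int)) : Prop := out = cl_reachable_alt R w_0
instance (R : Int) (w_0 : Int) (out : List (Int × Int)) : Decidable (Spec_cl_reachable R w_0 out) := by unfold Spec_cl_reachable; infer_instance

-- ===== CLAIM (what is proved, stated in full; the proofs are below) =====
def Claim_equal_cl_reachable : Prop := ∀ (R : Int) (w_0 : Int), Dom_cl_reachable R w_0 → Spec_cl_reachable R w_0 (cl_reachable R w_0)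

-- ===== LEMMAS AND PROOFS =====

-- `pvNew W L`: the elements of L not in W, first occurrences, in order of first
-- occurrence — exactly the states a marking pass over L adds to visited set W.
def pvNew {α : Type} [DecidableEq α] (W : List α) : List α → List α
  | [] => []
  | s :: L => if s ∈ W then pvNew W L else s :: pvNew (W ++ [s]) L

-- the unique successor of a joint state (what A computes inline and B's step_state computes)
def pvNext (R : Int) (s : Int × Int) : Int × Int := step_state R s.1 s.2

theorem mem_pvNew {α : Type} [DecidableEq α] (L : List α) : ∀ (W : List α) (x : α),
    x ∈ pvNew W L ↔ x ∈ L ∧ x ∉ W := by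
  induction L with
  | nil => simp [pvNew]
  | cons s L ih =>
    intro W x
    by_cases hs : s ∈ W
    · simp only [pvNew, if_pos hs, ih, List.mem_cons]
      constructor
      · rintro ⟨h1, h2⟩; exact ⟨Or.inr h1, h2⟩
      · rintro ⟨h1 | h1, h2⟩
        · exact absurd (h1 ▸ hs) h2
        · exact ⟨h1, h2⟩
    · simp only [pvNew, if_neg hs, List.mem_cons, ih, List.mem_append]
      constructor
      · rintro (rfl | ⟨h1, h2⟩)
        · exact ⟨Or.inl rfl, hs⟩
        · exact ⟨Or.inr h1, fun h => h2 (Or.inl h)⟩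
      · rintro ⟨rfl | h1, h2⟩
        · exact Or.inl rfl
        · by_cases hx : x = s
          · exact Or.inl hx
          · exact Or.inr ⟨h1, by simp [h2, hx]⟩

theorem pvNew_middle {α : Type} [DecidableEq α] (X : List α) : ∀ (W L : List α) (t : α),
    t ∈ W ∨ t ∈ X → pvNew W (X ++ t :: L) = pvNew W (X ++ L) := by
  induction X with
  | nil =>
    intro W L t ht
    simp only [List.nil_append, pvNew, if_pos (ht.resolve_right (by simp))]
  | cons x X ih =>
    intro W L t ht
    by_cases hx : x ∈ W
    · have ht' : t ∈ W ∨ t ∈ X := by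
        rcases ht with h | h
        · exact Or.inl h
        · rcases List.mem_cons.mp h with rfl | h
          · exact Or.inl hx
          · exact Or.inr h
      simp only [List.cons_append, pvNew, if_pos hx]
      exact ih W L t ht'
    · have ht' : t ∈ W ++ [x] ∨ t ∈ X := by
        rcases ht with h | h
        · exact Or.inl (List.mem_append.mpr (Or.inl h))
        · rcases List.mem_cons.mp h with rfl | h
          · exact Or.inl (List.mem_append.mpr (Or.inr (List.mem_singleton.mpr rfl)))
          · exact Or.inr h
      simp only [List.cons_append, pvNew, if_neg hx]
      congr 1
      exact ih (W ++ [x]) L t ht'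

-- KEY (B side): marking the images of H equals marking the images of the fresh
-- elements of H, provided images of already-visited elements of H lie in W.
theorem pvNew_map_eq {α : Type} [DecidableEq α] (g : α → α) (H : List α) :
    ∀ (vis W : List α), (∀ h, h ∈ H → h ∈ vis → g h ∈ W) →
    pvNew W (H.map g) = pvNew W ((pvNew vis H).map g) := by
  induction H with
  | nil => intro vis W _; simp [pvNew]
  | cons h T ih =>
    intro vis W hyp
    by_cases hv : h ∈ vis
    · have hgW : g h ∈ W := hyp h List.mem_cons_self hv
      simp only [List.map_cons, pvNew, if_pos hv, if_pos hgW]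
      exact ih vis W (fun x hx => hyp x (List.mem_cons_of_mem _ hx))
    · simp only [List.map_cons, pvNew, if_neg hv]
      by_cases hgW : g h ∈ W
      · simp only [if_pos hgW]
        exact ih (vis ++ [h]) W (by
          intro x hx hxv
          rcases List.mem_append.mp hxv with h1 | h1
          · exact hyp x (List.mem_cons_of_mem _ hx) h1
          · rw [List.mem_singleton.mp h1]; exact hgW)
      · simp only [if_neg hgW]
        congr 1
        exact ih (vis ++ [h]) (W ++ [g h]) (by
          intro x hx hxv
          rcases List.mem_append.mp hxv with h1 | h1
          · exact List.mem_append.mpr (Or.inl (hyp x (List.mem_cons_of_mem _ hx) h1))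
          · rw [List.mem_singleton.mp h1]; simp)

-- the pair A's inner loop builds from (m, w) is the successor map
theorem pvLevelA_pair (R : Int) (s : Int × Int) :
    (PySem.Int.bxor s.1 (get_action s.1 (get_obs s.2)),
      step_world R s.2 (get_action s.1 (get_obs s.2))) = pvNext R s := rfl

-- A's inner loop: the visited set after the pass
theorem pvLevelA_fst (R : Int) (F : List (Int × Int)) : ∀ (vis nx : List (Int × Int)),
    (pvLevelA R F vis nx).1 = vis ++ pvNew vis F := by
  induction F with
  | nil => intro vis nx; simp [pvLevelA, pvNew]
  | cons s F ih =>
    intro vis nx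
    by_cases hs : s ∈ vis
    · simp only [pvLevelA, if_pos hs, pvNew, ih]
    · simp only [pvLevelA, if_neg hs, pvNew, PySem.Set.add_of_not_mem hs]
      split <;> rw [ih] <;> simp

-- A's inner loop: nxt only grows
theorem pvLevelA_mono (R : Int) (F : List (Int × Int)) : ∀ (vis nx : List (Int × Int))
    (x : Int × Int), x ∈ nx → x ∈ (pvLevelA R F vis nx).2 := by
  induction F with
  | nil => intro vis nx x hx; simpa [pvLevelA] using hx
  | cons s F ih =>
    intro vis nx x hx
    by_cases hs : s ∈ vis
    · simp only [pvLevelA, if_pos hs]; exact ih _ _ _ hx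
    · simp only [pvLevelA, if_neg hs]
      split
      · exact ih _ _ _ hx
      · exact ih _ _ _ ((PySem.Set.mem_add _ _ _).mpr (Or.inl hx))

-- A's inner loop: successors of emitted states end up visited or in the next frontier
theorem pvLevelA_closure (R : Int) (F : List (Int × Int)) : ∀ (vis nx : List (Int × Int))
    (s : Int × Int), s ∈ pvNew vis F →
    pvNext R s ∈ vis ++ pvNew vis F ∨ pvNext R s ∈ (pvLevelA R F vis nx).2 := by
  induction F with
  | nil => intro vis nx s hs; simp [pvNew] at hs
  | cons t F ih =>
    intro vis nx s hs
    by_cases ht : t ∈ vis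
    · rw [pvNew, if_pos ht] at hs ⊢
      simp only [pvLevelA, if_pos ht]
      exact ih vis nx s hs
    · rw [pvNew, if_neg ht] at hs
      simp only [pvLevelA, if_neg ht, PySem.Set.add_of_not_mem ht, pvLevelA_pair]
      rcases List.mem_cons.mp hs with rfl | hs
      · by_cases hnv : pvNext R s ∈ vis ++ [s]
        · rw [if_pos hnv]
          left
          rcases List.mem_append.mp hnv with h | h
          · exact List.mem_append.mpr (Or.inl h)
          · refine List.mem_append.mpr (Or.inr ?_)
            rw [pvNew, if_neg ht]
            exact List.mem_cons.mpr (Or.inl (List.mem_singleton.mp h))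
        · rw [if_neg hnv]
          right
          exact pvLevelA_mono R F _ _ _ ((PySem.Set.mem_add _ _ _).mpr (Or.inr rfl))
      · have hrec := ih (vis ++ [t]) (if pvNext R t ∈ vis ++ [t] then nx
          else PySem.Set.add nx (pvNext R t)) s hs
        rcases hrec with h | h
        · left
          rw [pvNew, if_neg ht]
          rcases List.mem_append.mp h with h | h
          · rcases List.mem_append.mp h with h | h
            · exact List.mem_append.mpr (Or.inl h)
            · exact List.mem_append.mpr (Or.inr (List.mem_cons.mpr
                (Or.inl (List.mem_singleton.mp h))))
          · exact List.mem_append.mpr (Or.inr (List.mem_cons.mpr (Or.inr h)))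
        · right
          split at h <;> split <;> first
            | exact h
            | (rename_i h1 h2; exact absurd h1 h2)
            | (rename_i h1 h2; exact absurd h2 h1)

-- A's inner loop: up to states already visited at the pass's end, the next
-- frontier is nx followed by the successors of the emitted states
theorem pvLevelA_snd (R : Int) (F : List (Int × Int)) : ∀ (vis nx : List (Int × Int)),
    pvNew (vis ++ pvNew vis F) (pvLevelA R F vis nx).2
      = pvNew (vis ++ pvNew vis F) (nx ++ (pvNew vis F).map (pvNext R)) := by
  induction F with
  | nil => intro vis nx; simp [pvLevelA, pvNew]
  | cons s F ih =>
    intro vis nx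
    by_cases hs : s ∈ vis
    · simp only [pvLevelA, if_pos hs, pvNew, ih]
    · simp only [pvLevelA, if_neg hs, PySem.Set.add_of_not_mem hs, pvLevelA_pair]
      have hrw : vis ++ pvNew vis (s :: F) = (vis ++ [s]) ++ pvNew (vis ++ [s]) F := by
        rw [pvNew, if_neg hs]; simp
      have hmap : (pvNew vis (s :: F)).map (pvNext R)
          = pvNext R s :: (pvNew (vis ++ [s]) F).map (pvNext R) := by
        rw [pvNew, if_neg hs, List.map_cons]
      rw [hrw, hmap]
      by_cases hnv : pvNext R s ∈ vis ++ [s]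
      · rw [if_pos hnv, ih]
        exact (pvNew_middle nx _ _ (pvNext R s) (Or.inl (List.mem_append.mpr
          (Or.inl hnv)))).symm
      · rw [if_neg hnv]
        by_cases hnx : pvNext R s ∈ nx
        · rw [PySem.Set.add_of_mem hnx, ih]
          exact (pvNew_middle nx _ _ (pvNext R s) (Or.inr hnx)).symm
        · rw [PySem.Set.add_of_not_mem hnx, ih]
          simp

-- A's inner loop does nothing when everything is already visited
theorem pvLevelA_no_new (R : Int) (F : List (Int × Int)) : ∀ (vis nx : List (Int × Int)),
    pvNew vis F = [] → pvLevelA R F vis nx = (vis, nx) := by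
  induction F with
  | nil => intro vis nx _; rfl
  | cons s F ih =>
    intro vis nx h
    by_cases hs : s ∈ vis
    · rw [pvNew, if_pos hs] at h
      simp only [pvLevelA, if_pos hs]
      exact ih vis nx h
    · rw [pvNew, if_neg hs] at h
      exact absurd h (List.cons_ne_nil _ _)

-- B's marking pass, characterized
theorem pvEmitB_eq (H : List (Int × Int)) : ∀ (vis : List (Int × Int)) (b : Bool),
    pvEmitB H vis b = (vis ++ pvNew vis H, b || !(pvNew vis H).isEmpty) := by
  induction H with
  | nil => intro vis b; simp [pvEmitB, pvNew]
  | cons s H ih =>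
    intro vis b
    by_cases hs : s ∈ vis
    · simp only [pvEmitB, if_pos hs, pvNew, ih]
    · simp only [pvEmitB, if_neg hs, PySem.Set.add_of_not_mem hs, pvNew, ih]
      simp

theorem pvLoopA_nil (R : Int) (f : Nat) (vis : List (Int × Int)) :
    pvLoopA R f vis [] = vis := by
  cases f <;> simp [pvLoopA]

-- the simulation invariant: successors of visited states are visited or frontier
-- states, and the frontier and the cursor vector have the same fresh states
def pvInv (R : Int) (vis F H : List (Int × Int)) : Prop :=
  (∀ s ∈ vis, pvNext R s ∈ vis ∨ pvNext R s ∈ F) ∧ pvNew vis F = pvNew vis H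

-- MAIN LOOP LEMMA: under the invariant the two loops return the same list
theorem pvLoop_eq (R : Int) : ∀ (f : Nat) (vis F H : List (Int × Int)),
    pvInv R vis F H → pvLoopA R f vis F = pvLoopB R f vis H := by
  intro f
  induction f with
  | zero => intro vis F H _; rfl
  | succ f ih =>
    intro vis F H hInv
    obtain ⟨hcl, hnew⟩ := hInv
    have hmapB : pvLoopB R (f + 1) vis H =
        (if (!(pvNew vis H).isEmpty) = false then vis ++ pvNew vis H
         else pvLoopB R f (vis ++ pvNew vis H) (H.map (fun s => step_state R s.1 s.2))) := by
      simp only [pvLoopB, pvEmitB_eq, Bool.false_or]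
    by_cases hF : F = []
    · subst hF
      have h0 : pvNew vis ([] : List (Int × Int)) = [] := rfl
      rw [h0] at hnew
      rw [pvLoopA_nil, hmapB, ← hnew]
      simp
    · by_cases hE : pvNew vis F = []
      · -- frontier nonempty but fully visited: A does one silent pass then stops
        have hA : pvLoopA R (f + 1) vis F = pvLoopA R f vis PySem.Set.empty := by
          simp only [pvLoopA, List.isEmpty_iff, hF, if_false,
            pvLevelA_no_new R F vis PySem.Set.empty hE]
        rw [hA, hmapB, ← hnew, hE]
        simp [pvLoopA_nil]
      · -- productive round
        have hA : pvLoopA R (f + 1) vis F =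
            pvLoopA R f (vis ++ pvNew vis F) (pvLevelA R F vis PySem.Set.empty).2 := by
          simp only [pvLoopA, List.isEmpty_iff, hF, if_false, pvLevelA_fst]
        rw [hA, hmapB, ← hnew]
        rw [if_neg (by simp [List.isEmpty_iff, hE])]
        apply ih
        constructor
        · -- closure for the enlarged visited set
          intro s hsv
          rcases List.mem_append.mp hsv with hsv | hsv
          · rcases hcl s hsv with h | h
            · exact Or.inl (List.mem_append.mpr (Or.inl h))
            · by_cases hv : pvNext R s ∈ vis
              · exact Or.inl (List.mem_append.mpr (Or.inl hv))
              · exact Or.inl (List.mem_append.mpr (Or.inr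
                  ((mem_pvNew F vis (pvNext R s)).mpr ⟨h, hv⟩)))
          · exact pvLevelA_closure R F vis PySem.Set.empty s hsv
        · -- fresh states of the new frontier and of the advanced cursors agree
          have hAside := pvLevelA_snd R F vis PySem.Set.empty
          have hBside := pvNew_map_eq (pvNext R) H vis (vis ++ pvNew vis F) (by
            intro h hH hv
            rcases hcl h hv with h1 | h1
            · exact List.mem_append.mpr (Or.inl h1)
            · by_cases h2 : pvNext R h ∈ vis
              · exact List.mem_append.mpr (Or.inl h2)
              · exact List.mem_append.mpr (Or.inr
                  ((mem_pvNew F vis (pvNext R h)).mpr ⟨h1, h2⟩)))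
          have hmap : (H.map (fun s => step_state R s.1 s.2)) = H.map (pvNext R) := rfl
          rw [hAside, hmap, hBside, ← hnew]
          simp [PySem.Set.empty]

-- the four start states form a duplicate-free list, so set() keeps them as they are
theorem pvStarts_ofList (w_0 : Int) :
    PySem.Set.ofList ((PySem.List.pyRange 0 4 1).map (fun m => (m, w_0)))
      = (PySem.List.pyRange 0 4 1).map (fun m => (m, w_0)) := by
  have h : PySem.List.pyRange 0 4 1 = [0, 1, 2, 3] := by decide
  rw [h]
  simp [PySem.Set.ofList, PySem.Set.add, PySem.Set.contains, Prod.ext_iff]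

-- ===== VERDICT (by name: the statement is the Claim_ definition above) =====
theorem cl_reachable_spec : Claim_equal_cl_reachable := by
  intro R w_0 _
  unfold Spec_cl_reachable cl_reachable cl_reachable_alt
  rw [pvStarts_ofList]
  exact pvLoop_eq R 1000 PySem.Set.empty _ _ ⟨by simp [PySem.Set.empty], rfl⟩
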